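-- pv_equiv track=rewrite | github.com/oliverfael/pydcl | pydcl/utils.py | _validate_version_format
-- ===== SOURCE A (Python) =====
-- def _validate_version_format(version: str) -> bool:
--     """Validate semantic version format (major.minor.patch)."""
--
--     try:
--         parts = version.split('.')
--         if len(parts) != 3:
--             return False
--
--         # Validate numeric components
--         for part in parts:
--             if not part.isdigit():
--                 return False
--             if int(part) < 0:
--                 return False
--
--         return True
--
--     except Exception:
--         return False
-- ===== SOURCE B (Python) =====
-- def _validate_version_format(version: str) -> bool:
--     """Validate semantic version format (major.minor.patch) by a single left-to-right scan."""
--     try: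
--         i, n = 0, len(version)
--         for group in range(3):
--             start = i
--             while i < n and '0' <= version[i] <= '9':
--                 i += 1
--             if i == start:
--                 return False
--             if group < 2:
--                 if i >= n or version[i] != '.':
--                     return False
--                 i += 1
--         return i == n
--     except Exception:
--         return False
-- ===== Notes on version B (the rewrite author's own statement) =====
-- stated objective: alternative
-- what changed: A splits the string on the dot separator, checks the part count, then runs a per-part isdigit+int loop; B never builds the parts list and instead validates with one left-to-right scan of the characters (three nonempty digit runs separated by dots).
import Mathlib
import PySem

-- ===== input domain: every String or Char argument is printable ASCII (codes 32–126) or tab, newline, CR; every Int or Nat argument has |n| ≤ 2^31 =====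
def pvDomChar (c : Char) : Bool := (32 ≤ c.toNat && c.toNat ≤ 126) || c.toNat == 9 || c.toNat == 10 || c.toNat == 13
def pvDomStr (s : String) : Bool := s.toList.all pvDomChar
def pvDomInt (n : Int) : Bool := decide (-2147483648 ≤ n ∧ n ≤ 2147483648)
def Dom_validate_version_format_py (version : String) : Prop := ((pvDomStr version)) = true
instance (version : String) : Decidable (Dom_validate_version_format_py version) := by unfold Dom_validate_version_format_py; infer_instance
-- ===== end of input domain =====

-- B replaces A's split/per-part isdigit+int loop by one left-to-right scan of the string
-- (three nonempty digit runs separated by dots); same value on every admitted input, no speed claim.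

-- ===== PORT A =====
-- int(part) in A runs only after part.isdigit() has succeeded; on an all-ASCII-digit string
-- int() is exactly the plain base-10 digit fold below (exact on that guarded subdomain).
def pvIntOfDigits (cs : List Char) : Int :=
  cs.foldl (fun a c => a * 10 + ((c.toNat - 48 : Nat) : Int)) 0

def pvCheckParts : List (List Char) → Bool
  | [] => true
  | p :: rest =>
      if !(PySem.Chars.strIsdigit p) then false
      else if pvIntOfDigits p < 0 then false
      else pvCheckParts rest

def validate_version_format_py (version : String) : Bool :=
  let parts := PySem.Chars.splitOn version.toList ['.']
  if parts.length ≠ 3 then false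
  else pvCheckParts parts

-- ===== PORT B =====
def pvDigit (c : Char) : Bool := decide ('0' ≤ c) && decide (c ≤ '9')

-- scan one maximal digit run (must be nonempty); g = number of '.'-separated groups still expected
def pvScanGroups : Nat → List Char → Bool
  | g, cs =>
    if (cs.dropWhile pvDigit).length = cs.length then false
    else
      match g, cs.dropWhile pvDigit with
      | 0, r => r.isEmpty
      | g' + 1, '.' :: t => pvScanGroups g' t
      | _ + 1, _ => false

def validate_version_format_py_alt (version : String) : Bool :=
  pvScanGroups 2 version.toList

-- ===== PRECONDITION & SPEC =====
def Spec_validate_version_format_py (version : String) (out : Bool) : Prop := out = validate_version_format_py_alt version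
instance (version : String) (out : Bool) : Decidable (Spec_validate_version_format_py version out) := by unfold Spec_validate_version_format_py; infer_instance

-- ===== CLAIM (what is proved, stated in full; the proofs are below) =====
def Claim_equal_validate_version_format_py : Prop := ∀ (version : String), Dom_validate_version_format_py version → Spec_validate_version_format_py version (validate_version_format_py version)

-- ===== LEMMAS AND PROOFS =====

-- reference splitter: s.split('.') as a structural recursion
def pvSpl : List Char → List (List Char)
  | [] => [[]]
  | c :: t => if c = '.' then [] :: pvSpl t else (pvSpl t).modifyHead (c :: ·)

theorem pvSpl_cons_dot (t : List Char) : pvSpl ('.' :: t) = [] :: pvSpl t := by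
  simp [pvSpl]

theorem pvSpl_cons_ne (c : Char) (t : List Char) (hc : c ≠ '.') :
    pvSpl (c :: t) = (pvSpl t).modifyHead (c :: ·) := by
  simp only [pvSpl]; rw [if_neg hc]

theorem pvSpl_ne_nil (cs : List Char) : pvSpl cs ≠ [] := by
  induction cs with
  | nil => simp [pvSpl]
  | cons c t ih =>
    simp only [pvSpl]
    split
    · simp
    · cases h : pvSpl t with
      | nil => exact absurd h ih
      | cons p ps => simp [List.modifyHead]

set_option maxRecDepth 4096 in
theorem pv_go_eq : ∀ (fuel : Nat) (l cur : List Char) (acc : List (List Char)),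
    l.length < fuel →
    PySem.Chars.splitOn.go ['.'] fuel l cur acc
      = acc.reverse ++ (pvSpl l).modifyHead (cur.reverse ++ ·) := by
  intro fuel
  induction fuel with
  | zero => intro l cur acc h; omega
  | succ f ih =>
    intro l cur acc h
    cases l with
    | nil =>
      simp [PySem.Chars.splitOn.go, pvSpl, List.modifyHead]
    | cons c rest =>
      simp only [PySem.Chars.splitOn.go]
      by_cases hc : c = '.'
      · subst hc
        rw [if_pos (by simp [List.isPrefixOf])]
        rw [show List.drop ['.'].length ('.' :: rest) = rest from rfl]
        rw [ih rest [] (cur.reverse :: acc) (by simpa using Nat.lt_of_succ_lt_succ h)]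
        rw [pvSpl_cons_dot]
        obtain ⟨p, ps, hp⟩ := List.exists_cons_of_ne_nil (pvSpl_ne_nil rest)
        simp [hp, List.modifyHead]
      · rw [if_neg (by simp only [List.isPrefixOf, Bool.and_true, beq_iff_eq]; exact fun h => hc h.symm)]
        rw [ih rest (c :: cur) acc (by simpa using Nat.lt_of_succ_lt_succ h)]
        rw [pvSpl_cons_ne c rest hc]
        obtain ⟨p, ps, hp⟩ := List.exists_cons_of_ne_nil (pvSpl_ne_nil rest)
        simp [hp, List.modifyHead]

theorem pvSplitOn_eq (cs : List Char) : PySem.Chars.splitOn cs ['.'] = pvSpl cs := by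
  unfold PySem.Chars.splitOn
  rw [pv_go_eq (cs.length + 1) cs [] [] (by omega)]
  obtain ⟨p, ps, hp⟩ := List.exists_cons_of_ne_nil (pvSpl_ne_nil cs)
  rw [hp]; simp [List.modifyHead]

theorem pvIntOfDigits_aux_nonneg (cs : List Char) : ∀ a : Int, 0 ≤ a →
    0 ≤ cs.foldl (fun a c => a * 10 + ((c.toNat - 48 : Nat) : Int)) a := by
  induction cs with
  | nil => intro a ha; simpa using ha
  | cons c t ih =>
    intro a ha
    simp only [List.foldl]
    exact ih _ (by positivity)

theorem pvCheckParts_eq_all (ps : List (List Char)) :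
    pvCheckParts ps = ps.all PySem.Chars.strIsdigit := by
  induction ps with
  | nil => rfl
  | cons p rest ih =>
    simp only [pvCheckParts, List.all_cons]
    by_cases hd : PySem.Chars.strIsdigit p
    · rw [if_neg (by simp [hd]),
          if_neg (by simpa [pvIntOfDigits] using pvIntOfDigits_aux_nonneg p 0 le_rfl), ih, hd]
      simp
    · rw [if_pos (by simp [hd])]
      simp [hd]

theorem pvSpl_digits_prefix (ds : List Char) (h : ds.all pvDigit = true) :
    ∀ rest, pvSpl (ds ++ rest) = (pvSpl rest).modifyHead (ds ++ ·) := by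
  induction ds with
  | nil =>
    intro rest
    obtain ⟨p, ps, hp⟩ := List.exists_cons_of_ne_nil (pvSpl_ne_nil rest)
    simp [hp, List.modifyHead]
  | cons d t ih =>
    intro rest
    simp only [List.all_cons, Bool.and_eq_true] at h
    have hd : d ≠ '.' := by
      intro hd; subst hd; simp [pvDigit] at h
    rw [List.cons_append, pvSpl_cons_ne d (t ++ rest) hd, ih h.2]
    obtain ⟨p, ps, hp⟩ := List.exists_cons_of_ne_nil (pvSpl_ne_nil rest)
    simp [hp, List.modifyHead]

theorem pv_all_takeWhile (cs : List Char) : (cs.takeWhile pvDigit).all pvDigit = true := by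
  induction cs with
  | nil => rfl
  | cons c t ih =>
    by_cases hc : pvDigit c
    · simp [hc, ih]
    · simp [hc]

theorem pv_dropWhile_head (cs : List Char) (c : Char) (t : List Char)
    (h : cs.dropWhile pvDigit = c :: t) : pvDigit c = false := by
  induction cs with
  | nil => simp at h
  | cons a as ih =>
    by_cases ha : pvDigit a
    · exact ih (by simpa [List.dropWhile_cons, ha] using h)
    · rw [List.dropWhile_cons, if_neg (by simp [ha])] at h
      cases h
      simpa using ha

-- `all PySem.Chars.isdigit` and `all pvDigit` are the same test (definitionally)
theorem pv_all_isdigit_eq (l : List Char) :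
    List.all l PySem.Chars.isdigit = List.all l pvDigit := rfl

theorem pv_strIsdigit_of_all (l : List Char) (hne : l ≠ []) (h : l.all pvDigit = true) :
    PySem.Chars.strIsdigit l = true := by
  simp only [PySem.Chars.strIsdigit, pv_all_isdigit_eq, h, Bool.and_true]
  simp [hne]

-- a non-digit character in the first part kills `all strIsdigit`
theorem pv_all_head_nondigit (c : Char) (hc : pvDigit c = false)
    (pre p : List Char) (ps : List (List Char)) :
    ((pre ++ c :: p) :: ps).all PySem.Chars.strIsdigit = false := by
  have h1 : PySem.Chars.strIsdigit (pre ++ c :: p) = false := by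
    simp only [PySem.Chars.strIsdigit, pv_all_isdigit_eq]
    simp [List.all_append, hc]
  simp [h1]

-- one unfolding of the scanner (the definition is by well-founded recursion on g)
theorem pvScanGroups_eq (g : Nat) (cs : List Char) :
    pvScanGroups g cs
      = if (cs.dropWhile pvDigit).length = cs.length then false
        else
          match g, cs.dropWhile pvDigit with
          | 0, r => r.isEmpty
          | g' + 1, '.' :: t => pvScanGroups g' t
          | _ + 1, _ => false := by
  rw [pvScanGroups.eq_def]

theorem pv_scan_eq_aux : ∀ (n : Nat) (cs : List Char), cs.length ≤ n → ∀ g : Nat,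
    pvScanGroups g cs
      = (decide ((pvSpl cs).length = g + 1) && (pvSpl cs).all PySem.Chars.strIsdigit) := by
  intro n
  induction n with
  | zero =>
    intro cs hcs g
    have : cs = [] := List.eq_nil_of_length_eq_zero (Nat.le_zero.mp hcs)
    subst this
    cases g <;> simp [pvScanGroups, pvSpl, PySem.Chars.strIsdigit]
  | succ m ih =>
    intro cs hcs g
    have hdec := (List.takeWhile_append_dropWhile (p := pvDigit) (l := cs)).symm
    cases hr : cs.dropWhile pvDigit with
    | nil =>
      -- cs is all digits
      rw [hr, List.append_nil] at hdec
      have hall : cs.all pvDigit = true := by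
        rw [hdec]; exact pv_all_takeWhile cs
      cases hcs0 : cs with
      | nil => cases g <;> simp [pvScanGroups, pvSpl, PySem.Chars.strIsdigit]
      | cons a as =>
        rw [← hcs0]
        have hsp : pvSpl cs = [cs] := by
          have h1 := pvSpl_digits_prefix cs hall []
          simpa [pvSpl, List.modifyHead] using h1
        have hlen0 : cs.length ≠ 0 := by rw [hcs0]; simp
        have hdig : PySem.Chars.strIsdigit cs = true :=
          pv_strIsdigit_of_all cs (by rw [hcs0]; simp) hall
        rw [pvScanGroups_eq, hr, if_neg (by simpa using fun h => hlen0 h.symm)]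
        cases g with
        | zero => simp [hsp, hdig]
        | succ g' => simp [hsp, hdig]
    | cons c t =>
      have hcnd : pvDigit c = false := pv_dropWhile_head cs c t hr
      rw [hr] at hdec
      have hall : (cs.takeWhile pvDigit).all pvDigit = true := pv_all_takeWhile cs
      cases hds : cs.takeWhile pvDigit with
      | nil =>
        -- no digit consumed: scanner fails immediately
        rw [hds, List.nil_append] at hdec
        have hfalse : pvScanGroups g cs = false := by
          rw [pvScanGroups_eq, hr, if_pos (by rw [hdec])]
        rw [hfalse]
        by_cases hc : c = '.'
        · subst hc
          rw [hdec, pvSpl_cons_dot]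
          simp [PySem.Chars.strIsdigit]
        · rw [hdec, pvSpl_cons_ne c t hc]
          obtain ⟨p, ps, hp⟩ := List.exists_cons_of_ne_nil (pvSpl_ne_nil t)
          rw [hp]
          simp only [List.modifyHead]
          have hh := pv_all_head_nondigit c hcnd [] p ps
          simp only [List.nil_append] at hh
          simp [hh]
      | cons d ds =>
        -- nonempty digit prefix
        rw [hds] at hdec
        have hrlen : t.length + 1 < cs.length := by
          have h1 := congrArg List.length hdec
          simp [List.length_append] at h1
          omega
        have hne : (c :: t).length ≠ cs.length := by simp; omega
        have hsplit : pvSpl cs = (pvSpl (c :: t)).modifyHead ((d :: ds) ++ ·) := by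
          rw [hdec]
          exact pvSpl_digits_prefix (d :: ds) (by rw [← hds]; exact hall) (c :: t)
        have hdsdig : PySem.Chars.strIsdigit (d :: ds) = true :=
          pv_strIsdigit_of_all (d :: ds) (by simp) (by rw [← hds]; exact hall)
        rw [pvScanGroups_eq, hr, if_neg hne]
        by_cases hc : c = '.'
        · subst hc
          rw [hsplit, pvSpl_cons_dot]
          simp only [List.modifyHead]
          cases g with
          | zero =>
            have h0 : (pvSpl t).length ≠ 0 := by
              simpa [List.length_eq_zero_iff] using pvSpl_ne_nil t
            simp only [List.isEmpty_cons, List.length_cons, List.all_cons]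
            simp
            intro h _
            exact absurd h (pvSpl_ne_nil t)
          | succ g' =>
            have hih := ih t (by omega) g'
            simp only [List.length_cons, List.all_cons, List.append_nil, hdsdig, Bool.true_and]
            rw [hih]
            simp
        · rw [hsplit, pvSpl_cons_ne c t hc]
          obtain ⟨p, ps, hp⟩ := List.exists_cons_of_ne_nil (pvSpl_ne_nil t)
          rw [hp]
          simp only [List.modifyHead]
          have hh := pv_all_head_nondigit c hcnd (d :: ds) p ps
          simp only [List.cons_append] at hh ⊢
          cases g with
          | zero => simp [hh]
          | succ g' =>
            have hmm : (match (g' + 1 : Nat), (c :: t : List Char) with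
              | 0, r => r.isEmpty
              | g' + 1, '.' :: t => pvScanGroups g' t
              | _ + 1, _ => false) = false := by
              split
              · rename_i heq _; omega
              · rename_i heq
                injection heq with h1 h2
                exact absurd h1 hc
              · rfl
            rw [hmm]
            simp [hh]

-- ===== VERDICT (by name: the statement is the Claim_ definition above) =====
theorem validate_version_format_py_spec : Claim_equal_validate_version_format_py := by
  intro version _
  unfold Spec_validate_version_format_py
  show validate_version_format_py version = validate_version_format_py_alt version
  simp only [validate_version_format_py, validate_version_format_py_alt]
  rw [pvSplitOn_eq, pvCheckParts_eq_all,
      pv_scan_eq_aux version.toList.length version.toList le_rfl 2]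
  by_cases h3 : (pvSpl version.toList).length = 3
  · simp [h3]
  · simp [h3]
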